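-- pv_equiv track=rewrite | github.com/dathd6/NoC-Design-Optimization | algorithms/soo/bayesian.py | list_to_representative_number
-- ===== SOURCE A (Python) =====
-- def factorial(n):
--     if n == 0:
--         return 1
--     result = 1
--     for i in range(2, n + 1):
--         result *= i
--     return result
--
-- def list_to_representative_number(lst):
--     n = len(lst)
--     factoradic = 0
--     for i in range(n):
--         rank = 0
--         for j in range(i + 1, n):
--             if lst[j] < lst[i]:
--                 rank += 1
--         factoradic += rank * factorial(n - i - 1)
--     return factoradic
-- ===== SOURCE B (Python) =====
-- def list_to_representative_number(lst):
--     # Right-to-left pass: keep the already-seen suffix in a sorted list;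
--     # the Lehmer digit of x is its insertion point (count of smaller
--     # elements to the right), found by hand-written binary search.
--     # Factorial weights are accumulated incrementally.
--     total = 0
--     fact = 1
--     k = 0
--     s = []
--     for x in reversed(lst):
--         lo = 0
--         hi = len(s)
--         while lo < hi:
--             mid = (lo + hi) // 2
--             if s[mid] < x:
--                 lo = mid + 1
--             else:
--                 hi = mid
--         s.insert(lo, x)
--         total += lo * fact
--         k += 1
--         fact *= k
--     return total
-- ===== Notes on version B (the rewrite author's own statement) =====
-- stated objective: faster
-- what changed: Replaces A's nested left-to-right scans (with factorial(n-i-1) recomputed by a fresh loop at every step) by a single right-to-left pass that keeps the already-seen suffix in a sorted list, finds each Lehmer digit by binary search, and accumulates the factorial weight incrementally.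
import Mathlib
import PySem

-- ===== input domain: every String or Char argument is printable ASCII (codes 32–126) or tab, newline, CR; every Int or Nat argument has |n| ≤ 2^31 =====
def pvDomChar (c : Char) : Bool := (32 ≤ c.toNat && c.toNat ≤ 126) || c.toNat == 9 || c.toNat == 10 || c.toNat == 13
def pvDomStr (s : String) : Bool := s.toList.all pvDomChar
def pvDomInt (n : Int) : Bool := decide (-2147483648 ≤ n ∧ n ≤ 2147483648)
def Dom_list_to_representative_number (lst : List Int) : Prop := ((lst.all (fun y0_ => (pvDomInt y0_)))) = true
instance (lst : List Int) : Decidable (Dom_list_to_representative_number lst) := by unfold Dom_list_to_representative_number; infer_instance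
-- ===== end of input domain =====

-- B re-implements the Lehmer-code computation as a single right-to-left pass that keeps the
-- already-seen suffix sorted (binary-search insertion) and accumulates factorials incrementally,
-- instead of A's nested scans with a factorial recomputed from scratch at every step.

-- ===== PORT A =====
-- port of A's helper `factorial`
def pvFactorial (n : Int) : Int :=
  if n = 0 then 1
  else (PySem.List.pyRange 2 (n + 1)).foldl (fun result i => result * i) 1

def list_to_representative_number (lst : List Int) : Int :=
  let n : Int := lst.length
  (PySem.List.pyRange 0 n).foldl
    (fun factoradic i =>
      let rank : Int :=
        (PySem.List.pyRange (i + 1) n).foldl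
          (fun rank j =>
            if PySem.List.pyGetD lst j 0 < PySem.List.pyGetD lst i 0 then rank + 1 else rank)
          0
      factoradic + rank * pvFactorial (n - i - 1))
    0

-- ===== PORT B =====
-- B's hand-written `while lo < hi` binary search; s[mid] is always in range when hi ≤ len s,
-- so pyGetD with default 0 is exact there.
def pvBisect (s : List Int) (x : Int) (lo hi : Nat) : Nat :=
  if _h : lo < hi then
    let mid := (lo + hi) / 2
    if PySem.List.pyGetD s (mid : Int) 0 < x then pvBisect s x (mid + 1) hi
    else pvBisect s x lo mid
  else lo
termination_by hi - lo
decreasing_by all_goals omega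

def list_to_representative_number_alt (lst : List Int) : Int :=
  (lst.reverse.foldl
    (fun st x =>
      let lo := pvBisect st.2.2.2 x 0 st.2.2.2.length
      (st.1 + (lo : Int) * st.2.1, st.2.1 * (st.2.2.1 + 1), st.2.2.1 + 1,
        PySem.List.insert st.2.2.2 (lo : Int) x))
    ((0 : Int), (1 : Int), (0 : Int), ([] : List Int))).1

-- ===== PRECONDITION & SPEC =====
def Spec_list_to_representative_number (lst : List Int) (out : Int) : Prop := out = list_to_representative_number_alt lst
instance (lst : List Int) (out : Int) : Decidable (Spec_list_to_representative_number lst out) := by unfold Spec_list_to_representative_number; infer_instance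

-- ===== CLAIM (what is proved, stated in full; the proofs are below) =====
def Claim_equal_list_to_representative_number : Prop := ∀ (lst : List Int), Dom_list_to_representative_number lst → Spec_list_to_representative_number lst (list_to_representative_number lst)

-- ===== LEMMAS AND PROOFS =====

-- the common specification: the Lehmer code value, by structural recursion
def pvL : List Int → Int
  | [] => 0
  | x :: r => (r.countP (fun y => decide (y < x)) : Int) * (Nat.factorial r.length : Int) + pvL r

lemma pvFactorial_cast (m : Nat) : pvFactorial (m : Int) = (Nat.factorial m : Int) := by
  induction m with
  | zero => simp [pvFactorial]
  | succ k ih =>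
    rcases Nat.eq_zero_or_pos k with hk | hk
    · subst hk; simp [pvFactorial, PySem.List.pyRange_one_eq_nil]
    · have hcast : ((k + 1 : Nat) : Int) + 1 = ((k : Int) + 1) + 1 := by push_cast; ring
      have hstep : PySem.List.pyRange 2 (((k : Int) + 1) + 1) =
          PySem.List.pyRange 2 ((k : Int) + 1) ++ [(k : Int) + 1] :=
        PySem.List.pyRange_one_succ_right (by omega)
      unfold pvFactorial
      rw [if_neg (by push_cast; omega), hcast, hstep, List.foldl_append]
      unfold pvFactorial at ih
      rw [if_neg (by omega)] at ih
      simp only [List.foldl, ih]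
      rw [Nat.factorial_succ]
      push_cast; ring
lemma pyRange_natCast (a b : Nat) :
    PySem.List.pyRange (a : Int) (b : Int) =
      (List.range (b - a)).map (fun k => ((a + k : Nat) : Int)) := by
  rcases Nat.lt_or_ge a b with h | h
  · rw [PySem.List.pyRange_one_cons (by exact_mod_cast h)]
    have e1 : ((a : Int) + 1) = ((a + 1 : Nat) : Int) := by push_cast; ring
    rw [e1, pyRange_natCast (a + 1) b]
    have e2 : b - a = (b - (a + 1)) + 1 := by omega
    rw [e2, List.range_succ_eq_map, List.map_cons, List.map_map]
    simp [Function.comp]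
    intro k _
    ring
  · rw [PySem.List.pyRange_one_eq_nil (by exact_mod_cast h)]
    have : b - a = 0 := by omega
    simp [this]
termination_by b - a
lemma pvInsert_natCast (s : List Int) (x : Int) (r : Nat) (h : r ≤ s.length) :
    PySem.List.insert s (r : Int) x = s.take r ++ x :: s.drop r := by
  simp [PySem.List.insert, PySem.List.sliceIndices]
  have h1 : ¬ ((r : Int) < 0) := by omega
  rw [if_neg h1]
  have h2 : min (r : Int) (s.length : Int) = (r : Int) := by omega
  rw [h2]
  simp
lemma pvBisect_bracket (s : List Int) (x : Int) (hs : s.Pairwise (· ≤ ·)) :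
    ∀ lo hi, lo ≤ hi → hi ≤ s.length →
    (∀ i, i < lo → s.getD i 0 < x) →
    (∀ i, hi ≤ i → i < s.length → ¬ s.getD i 0 < x) →
    lo ≤ pvBisect s x lo hi ∧ pvBisect s x lo hi ≤ hi ∧
    (∀ i, i < pvBisect s x lo hi → s.getD i 0 < x) ∧
    (∀ i, pvBisect s x lo hi ≤ i → i < s.length → ¬ s.getD i 0 < x) := by
  have hmono : ∀ i j, i ≤ j → j < s.length → s.getD i 0 ≤ s.getD j 0 := by
    intro i j hij hj
    rw [List.getD_eq_getElem s 0 (by omega), List.getD_eq_getElem s 0 hj]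
    rcases Nat.lt_or_ge i j with h | h
    · exact List.pairwise_iff_getElem.mp hs i j (by omega) hj h
    · have : i = j := by omega
      subst this; rfl
  intro lo hi
  induction lo, hi using pvBisect.induct s x with
  | case1 lo hi h mid hmid ih =>
    have hmd : mid = (lo + hi) / 2 := rfl
    intro hlohi hhil hlow hhigh
    rw [pvBisect, dif_pos h, if_pos hmid, ← hmd]
    have hmidx : s.getD mid 0 < x := by
      rw [← PySem.List.pyGetD_natCast s mid 0]; exact hmid
    obtain ⟨h1, h2, h3, h4⟩ := ih (by omega) hhil
      (fun i hi' => lt_of_le_of_lt (hmono i mid (by omega) (by omega)) hmidx)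
      hhigh
    exact ⟨by omega, h2, h3, h4⟩
  | case2 lo hi h mid hmid ih =>
    have hmd : mid = (lo + hi) / 2 := rfl
    intro hlohi hhil hlow hhigh
    rw [pvBisect, dif_pos h, if_neg hmid, ← hmd]
    have hmidx : ¬ s.getD mid 0 < x := by
      rw [← PySem.List.pyGetD_natCast s mid 0]; exact hmid
    obtain ⟨h1, h2, h3, h4⟩ := ih (by omega) (by omega) hlow
      (fun i hi' hil h' => hmidx (lt_of_le_of_lt (hmono mid i hi' hil) h'))
    exact ⟨h1, by omega, h3, h4⟩
  | case3 lo hi h =>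
    intro hlohi hhil hlow hhigh
    rw [pvBisect, dif_neg h]
    have heq : lo = hi := by omega
    subst heq
    exact ⟨le_refl _, le_refl _, fun i hi' => hlow i hi', fun i hi' hil => hhigh i hi' hil⟩
lemma countP_eq_of_bracket (s : List Int) (x : Int) : ∀ r : Nat, r ≤ s.length →
    (∀ i, i < r → s.getD i 0 < x) →
    (∀ i, r ≤ i → i < s.length → ¬ s.getD i 0 < x) →
    s.countP (fun y => decide (y < x)) = r := by
  induction s with
  | nil => intro r hr _ _; simp at hr; subst hr; rfl
  | cons y t ih =>
    intro r hr h1 h2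
    match r with
    | 0 =>
      rw [List.countP_eq_zero.mpr]
      intro a ha
      obtain ⟨i, hi, rfl⟩ := List.mem_iff_getElem.mp ha
      simp only [decide_eq_true_eq]
      rw [← List.getD_eq_getElem (y :: t) 0 hi]
      exact h2 i (by omega) hi
    | r' + 1 =>
      have hy : decide (y < x) = true := by
        have := h1 0 (by omega)
        simpa using this
      rw [List.countP_cons]
      have hih := ih r' (by simpa using hr)
        (fun i hi => by have := h1 (i + 1) (by omega); simpa using this)
        (fun i hi hil => by have := h2 (i + 1) (by omega) (by simpa using Nat.succ_lt_succ hil); simpa using this)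
      simp [hy, hih]
lemma sorted_insert (s : List Int) (x : Int) (r : Nat) (hs : s.Pairwise (· ≤ ·))
    (h1 : ∀ i, i < r → s.getD i 0 < x)
    (h2 : ∀ i, r ≤ i → i < s.length → ¬ s.getD i 0 < x) :
    (s.take r ++ x :: s.drop r).Pairwise (· ≤ ·) := by
  have hidx := List.pairwise_iff_getElem.mp hs
  rw [List.pairwise_append]
  refine ⟨hs.sublist (List.take_sublist r s), ?_, ?_⟩
  · rw [List.pairwise_cons]
    refine ⟨?_, hs.sublist (List.drop_sublist r s)⟩
    intro b hb
    obtain ⟨j, hj, rfl⟩ := List.mem_iff_getElem.mp hb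
    rw [List.getElem_drop]
    have hlen : r + j < s.length := by simp at hj; omega
    have := h2 (r + j) (by omega) hlen
    rw [List.getD_eq_getElem s 0 hlen] at this
    omega
  · intro a ha b hb
    obtain ⟨i, hi, rfl⟩ := List.mem_iff_getElem.mp ha
    rw [List.getElem_take] at *
    have hir : i < r := by simp at hi; omega
    have hilen : i < s.length := by simp at hi; omega
    have hax : s[i] < x := by
      have := h1 i hir
      rwa [List.getD_eq_getElem s 0 hilen] at this
    rcases List.mem_cons.mp hb with rfl | hb'
    · simpa using le_of_lt hax
    · obtain ⟨j, hj, rfl⟩ := List.mem_iff_getElem.mp hb'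
      rw [List.getElem_drop]
      have hlen : r + j < s.length := by simp at hj; omega
      simpa using hidx i (r + j) hilen hlen (by omega)
def pvTerm (lst : List Int) (i : Nat) : Int :=
  ((List.range (lst.length - (i + 1))).countP
      (fun k => decide (PySem.List.pyGetD lst ((i + 1 + k : Nat) : Int) 0
                        < PySem.List.pyGetD lst ((i : Nat) : Int) 0)) : Int)
    * pvFactorial ((lst.length : Int) - (i : Int) - 1)

lemma a_eq_sum (lst : List Int) :
    list_to_representative_number lst = ((List.range lst.length).map (pvTerm lst)).sum := by
  show (PySem.List.pyRange 0 (lst.length : Int)).foldl _ 0 = _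
  rw [PySem.List.pyRange_zero_natCast, List.foldl_map, PySem.List.foldl_add]
  rw [zero_add]
  congr 1
  apply List.map_congr_left
  intro i hi
  unfold pvTerm
  congr 1
  rw [show ((i : Int) + 1) = ((i + 1 : Nat) : Int) by push_cast; ring,
    pyRange_natCast (i + 1) lst.length, List.foldl_map,
    PySem.List.foldl_ite_add_one
      (fun k => PySem.List.pyGetD lst ((i + 1 + k : Nat) : Int) 0
                < PySem.List.pyGetD lst ((i : Nat) : Int) 0)]
  simp

lemma map_getD_range (r : List Int) : (List.range r.length).map (fun k => r.getD k 0) = r := by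
  apply List.ext_getElem <;> simp
  intro i h1 h2
  simp [List.getElem?_eq_getElem h2]

lemma pyGetD_cons_succ (x : Int) (r : List Int) (n : Nat) :
    PySem.List.pyGetD (x :: r) ((n + 1 : Nat) : Int) 0 = PySem.List.pyGetD r (n : Int) 0 := by
  rw [PySem.List.pyGetD_natCast, PySem.List.pyGetD_natCast, List.getD_cons_succ]

lemma sum_eq_pvL (lst : List Int) :
    ((List.range lst.length).map (pvTerm lst)).sum = pvL lst := by
  induction lst with
  | nil => rfl
  | cons x r ih =>
    rw [show (x :: r).length = r.length + 1 from rfl, List.range_succ_eq_map,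
      List.map_cons, List.sum_cons, List.map_map]
    have hterm : ∀ i ∈ List.range r.length, (pvTerm (x :: r) ∘ Nat.succ) i = pvTerm r i := by
      intro i _
      simp only [Function.comp, Nat.succ_eq_add_one]
      unfold pvTerm
      have e1 : (x :: r).length - ((i + 1) + 1) = r.length - (i + 1) := by simp
      have e3 : ((x :: r).length : Int) - ((i + 1 : Nat) : Int) - 1
          = (r.length : Int) - (i : Int) - 1 := by push_cast [List.length_cons]; ring
      rw [e1, e3]
      congr 2
      apply List.countP_congr
      intro k _
      rw [show (i + 1) + 1 + k = ((i + 1 + k) + 1 : Nat) from by omega, pyGetD_cons_succ,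
        pyGetD_cons_succ]
    rw [List.map_congr_left hterm, ih]
    show pvTerm (x :: r) 0 + pvL r = pvL (x :: r)
    unfold pvTerm
    have e0 : PySem.List.pyGetD (x :: r) ((0 : Nat) : Int) 0 = x := by
      rw [PySem.List.pyGetD_natCast]; rfl
    have e1 : (x :: r).length - (0 + 1) = r.length := by simp
    have e2 : ((x :: r).length : Int) - ((0 : Nat) : Int) - 1 = ((r.length : Nat) : Int) := by
      simp
    have e3 : ∀ k : Nat, (0 + 1 + k : Nat) = k + 1 := by intro k; omega
    rw [e0, e1, e2, pvFactorial_cast]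
    have e4 : (List.range r.length).countP
        (fun k => decide (PySem.List.pyGetD (x :: r) ((0 + 1 + k : Nat) : Int) 0 < x))
        = r.countP (fun y => decide (y < x)) := by
      have e5 : (fun k => decide (PySem.List.pyGetD (x :: r) ((0 + 1 + k : Nat) : Int) 0 < x))
          = fun k => decide (r.getD k 0 < x) := by
        funext k
        rw [e3 k, pyGetD_cons_succ, PySem.List.pyGetD_natCast]
      rw [e5]
      conv_rhs => rw [← map_getD_range r]
      rw [List.countP_map]
      rfl
    rw [e4]
    rfl

lemma alt_inv (lst : List Int) : ∃ s : List Int,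
    List.foldr (fun x st =>
        let lo := pvBisect st.2.2.2 x 0 st.2.2.2.length
        (st.1 + (lo : Int) * st.2.1, st.2.1 * (st.2.2.1 + 1), st.2.2.1 + 1,
          PySem.List.insert st.2.2.2 (lo : Int) x))
      ((0 : Int), (1 : Int), (0 : Int), ([] : List Int)) lst
    = (pvL lst, (Nat.factorial lst.length : Int), (lst.length : Int), s)
    ∧ s.Pairwise (· ≤ ·) ∧ s.Perm lst := by
  induction lst with
  | nil => exact ⟨[], rfl, List.Pairwise.nil, List.Perm.refl []⟩
  | cons x r ih =>
    obtain ⟨s, hfold, hsort, hperm⟩ := ih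
    rw [List.foldr_cons, hfold]
    have hlen : s.length = r.length := hperm.length_eq
    obtain ⟨hlo0, hlole, h3, h4⟩ := pvBisect_bracket s x hsort 0 s.length
      (Nat.zero_le _) (le_refl _) (fun i hi => absurd hi (by omega)) (fun i hi hil => absurd hil (by omega))
    set lo := pvBisect s x 0 s.length with hlodef
    have hcount : s.countP (fun y => decide (y < x)) = lo := countP_eq_of_bracket s x lo hlole h3 h4
    have hcountr : r.countP (fun y => decide (y < x)) = lo := by
      rw [← hperm.countP_eq]; exact hcount
    refine ⟨s.take lo ++ x :: s.drop lo, ?_, sorted_insert s x lo hsort h3 h4, ?_⟩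
    · simp only []
      rw [pvInsert_natCast s x lo hlole]
      have h1 : pvL r + (lo : Int) * (Nat.factorial r.length : Int) = pvL (x :: r) := by
        show _ = (r.countP (fun y => decide (y < x)) : Int) * (Nat.factorial r.length : Int) + pvL r
        rw [hcountr]; ring
      have h2 : (Nat.factorial r.length : Int) * ((r.length : Int) + 1)
          = (Nat.factorial (x :: r).length : Int) := by
        simp [Nat.factorial_succ]; ring
      have h3' : (r.length : Int) + 1 = ((x :: r).length : Int) := by simp
      rw [h1, h2, h3']
    · refine List.Perm.trans List.perm_middle ?_
      rw [List.take_append_drop]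
      exact hperm.cons x

lemma alt_eq_pvL (lst : List Int) : list_to_representative_number_alt lst = pvL lst := by
  unfold list_to_representative_number_alt
  rw [List.foldl_reverse]
  obtain ⟨s, hfold, _, _⟩ := alt_inv lst
  rw [hfold]

lemma a_eq_pvL (lst : List Int) : list_to_representative_number lst = pvL lst :=
  (a_eq_sum lst).trans (sum_eq_pvL lst)

-- ===== VERDICT (by name: the statement is the Claim_ definition above) =====
theorem list_to_representative_number_spec : Claim_equal_list_to_representative_number := by
  intro lst _
  show _ = _
  rw [a_eq_pvL, alt_eq_pvL]
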